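-- pv_equiv track=rewrite | github.com/Mattlock0/NameGenerator | src/tools/name_parser.py | name_to_template
-- ===== SOURCE A (Python) =====
-- CONSONANTS = ['b', 'c', 'd', 'f', 'g', 'h', 'j', 'k', 'l', 'm', 'n', 'p', 'q', 'r', 's', 't', 'v', 'w', 'x', 'z']
--
-- def name_to_template(name):
--     letters = ([*name])  # separate name into a list of letters
--     template = ""  # blank template
--
--     for letter in letters:
--         if letter.lower() in CONSONANTS:
--             template += 'c'
--         else:
--             template += 'v'
--
--     return template
-- ===== SOURCE B (Python) =====
-- import re
--
-- def name_to_template(name):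
--     s = ''.join(name)  # accept strings and iterables of single-char strings, like [*name]
--     s = re.sub(r'[bcdfghjklmnpqrstvwxz]', 'c', s, flags=re.IGNORECASE)
--     return re.sub(r'[^c]', 'v', s)
-- ===== Notes on version B (the rewrite author's own statement) =====
-- stated objective: idiomatic
-- what changed: Replaced the explicit per-character accumulate loop with two whole-string regex substitution passes: consonants (case-insensitive) to 'c', then every remaining character to 'v'.
import Mathlib
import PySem

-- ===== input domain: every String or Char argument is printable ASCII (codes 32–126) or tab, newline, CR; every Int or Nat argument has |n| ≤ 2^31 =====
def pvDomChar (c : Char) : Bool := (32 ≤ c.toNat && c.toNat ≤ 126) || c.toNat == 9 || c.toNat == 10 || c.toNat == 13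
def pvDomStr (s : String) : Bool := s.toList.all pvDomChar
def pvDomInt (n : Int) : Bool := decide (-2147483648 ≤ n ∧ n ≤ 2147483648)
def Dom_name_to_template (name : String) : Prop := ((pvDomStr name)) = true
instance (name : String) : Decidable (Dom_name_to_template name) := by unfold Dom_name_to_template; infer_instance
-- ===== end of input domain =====

-- B replaces A's per-character accumulate loop with two whole-string substitution passes
-- (regex in Python, ported as char-class substitution maps): more idiomatic, same cost.


-- ===== PORT A =====
def CONSONANTS : List Char :=
  ['b', 'c', 'd', 'f', 'g', 'h', 'j', 'k', 'l', 'm', 'n', 'p', 'q', 'r', 's', 't', 'v', 'w', 'x', 'z']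

def name_to_template (name : String) : String :=
  -- letters = [*name]; template = ""; for letter in letters: template += 'c'/'v'
  String.mk (name.toList.foldl
    (fun template letter =>
      template ++ (if PySem.Chars.lowerChar letter ∈ CONSONANTS then ['c'] else ['v']))
    [])

-- ===== PORT B =====
-- re.sub(r'[bcdfghjklmnpqrstvwxz]', 'c', s, flags=re.IGNORECASE): a single-char character
-- class with IGNORECASE replaces exactly the chars whose lowercase is in the class (exact
-- on the ASCII domain); ported by hand as a map over the code points.
def name_to_template_alt (name : String) : String :=
  let s1 := name.toList.map
    (fun ch => if PySem.Chars.lowerChar ch ∈ CONSONANTS then 'c' else ch)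
  -- re.sub(r'[^c]', 'v', s): every char other than 'c' becomes 'v'
  String.mk (s1.map (fun ch => if ch ≠ 'c' then 'v' else ch))

-- ===== PRECONDITION & SPEC =====
def Spec_name_to_template (name : String) (out : String) : Prop := out = name_to_template_alt name
instance (name : String) (out : String) : Decidable (Spec_name_to_template name out) := by unfold Spec_name_to_template; infer_instance

-- ===== CLAIM (what is proved, stated in full; the proofs are below) =====
def Claim_equal_name_to_template : Prop := ∀ (name : String), Dom_name_to_template name → Spec_name_to_template name (name_to_template name)

-- ===== LEMMAS AND PROOFS =====
-- per character, A's classification equals B's two substitution passes composed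
theorem perChar_eq (ch : Char) :
    (if (if PySem.Chars.lowerChar ch ∈ CONSONANTS then 'c' else ch) ≠ 'c' then 'v'
     else (if PySem.Chars.lowerChar ch ∈ CONSONANTS then 'c' else ch))
    = (if PySem.Chars.lowerChar ch ∈ CONSONANTS then 'c' else 'v') := by
  by_cases h : PySem.Chars.lowerChar ch ∈ CONSONANTS
  · simp [h]
  · have hne : ch ≠ 'c' := by
      intro hc; exact h (by rw [hc]; decide)
    simp [h, hne]

-- ===== VERDICT (by name: the statement is the Claim_ definition above) =====
theorem name_to_template_spec : Claim_equal_name_to_template := by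
  intro name _
  unfold Spec_name_to_template name_to_template name_to_template_alt
  simp only [← apply_ite (fun c : Char => [c])]
  rw [PySem.List.foldl_append_singleton_eq_map, List.map_map]
  refine congrArg String.mk (List.map_congr_left fun ch _ => ?_)
  exact (perChar_eq ch).symm
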